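-- pv_equiv track=rewrite | github.com/HimethSanjula11/COMP-5012--Computational-Intelligence | shift3.py | calculate_completion_times
-- ===== SOURCE A (Python) =====
-- def calculate_completion_times(individual, start_end_times):
--     """Calculate the completion time for each job based on the shift assignments."""
--     n_jobs = len(individual)
--     processing_times = [end - start for start, end in [(job[0], job[1]) for job in start_end_times]]
--
--     # Initialize completion times for each shift
--     shift_completion_times = {}
--
--     # Schedule jobs on their assigned shifts
--     completion_times = []
--
--     for job_idx in range(n_jobs):
--         shift = individual[job_idx]
--         proc_time = processing_times[job_idx]
--         earliest_start = start_end_times[job_idx][0]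
--
--         # Get the current completion time for this shift
--         current_time = shift_completion_times.get(shift, 0)
--
--         # Job can't start before its earliest start time
--         start_time = max(current_time, earliest_start)
--
--         # Calculate completion time
--         completion_time = start_time + proc_time
--
--         # Update the shift's completion time
--         shift_completion_times[shift] = completion_time
--
--         # Store the job's completion time
--         completion_times.append(completion_time)
--
--     return completion_times
-- ===== SOURCE B (Python) =====
-- def calculate_completion_times(individual, start_end_times):
--     """Calculate the completion time for each job based on the shift assignments.
--
--     Alternative decomposition: no shift->time dictionary and no separate
--     processing-times list; for each job, scan backwards for the most recent
--     earlier job on the same shift and chain from its completion time.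
--     """
--     n_jobs = len(individual)
--     completion_times = []
--     for i in range(n_jobs):
--         start_i, end_i = start_end_times[i]
--         prev = 0
--         for j in range(i - 1, -1, -1):
--             if individual[j] == individual[i]:
--                 prev = completion_times[j]
--                 break
--         completion_times.append(max(prev, start_i) + (end_i - start_i))
--     return completion_times
-- ===== Notes on version B (the rewrite author's own statement) =====
-- stated objective: alternative
-- what changed: Replaces the running shift->completion dictionary and the precomputed processing-times list by a backward scan that finds the most recent earlier job on the same shift and chains from its completion time.
-- outside the precondition, e.g. on calculate_completion_times([0, 1], [(0, 2)]): A raises IndexError, B raises IndexError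
import Mathlib
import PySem

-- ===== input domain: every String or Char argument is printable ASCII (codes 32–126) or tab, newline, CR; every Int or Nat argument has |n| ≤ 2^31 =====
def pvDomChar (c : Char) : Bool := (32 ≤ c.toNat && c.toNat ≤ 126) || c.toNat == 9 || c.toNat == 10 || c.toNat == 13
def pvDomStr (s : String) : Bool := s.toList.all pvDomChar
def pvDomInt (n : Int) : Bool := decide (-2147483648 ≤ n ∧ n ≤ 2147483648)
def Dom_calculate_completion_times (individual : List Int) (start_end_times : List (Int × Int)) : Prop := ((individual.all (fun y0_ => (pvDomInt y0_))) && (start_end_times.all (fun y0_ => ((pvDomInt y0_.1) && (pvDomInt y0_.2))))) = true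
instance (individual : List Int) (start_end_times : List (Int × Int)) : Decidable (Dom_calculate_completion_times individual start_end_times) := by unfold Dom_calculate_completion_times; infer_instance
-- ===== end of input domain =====

-- B replaces A's running shift→completion dictionary (and precomputed processing-times list)
-- by a backward scan for the most recent earlier same-shift job: an alternative decomposition, not faster.


-- ===== PORT A =====
-- A's loop body: dict lookup of the shift's last completion, schedule, dict update, append.
-- List indexing uses getD: exact under Pre_ (every index is in range).
def pvStepA (individual : List Int) (start_end_times : List (Int × Int)) (proc_times : List Int)
    (st : PySem.Dict Int Int × List Int) (job_idx : Nat) : PySem.Dict Int Int × List Int :=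
  let shift := individual.getD job_idx 0
  let proc_time := proc_times.getD job_idx 0
  let earliest_start := (start_end_times.getD job_idx (0, 0)).1
  let current_time := st.1.getD shift 0
  let start_time := max current_time earliest_start
  let completion_time := start_time + proc_time
  (st.1.insert shift completion_time, st.2 ++ [completion_time])

def calculate_completion_times (individual : List Int) (start_end_times : List (Int × Int)) : List Int :=
  let proc_times := start_end_times.map (fun p => p.2 - p.1)
  ((List.range individual.length).foldl (pvStepA individual start_end_times proc_times)
    (PySem.Dict.empty, [])).2

-- ===== PORT B =====
-- B's inner loop 'for j in range(i-1,-1,-1): if same shift: prev = comps[j]; break'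
def pvFindPrev (individual : List Int) (comps : List Int) (shift : Int) : Nat → Int
  | 0 => 0
  | j + 1 => if individual.getD j 0 == shift then comps.getD j 0 else pvFindPrev individual comps shift j

def pvStepB (individual : List Int) (start_end_times : List (Int × Int))
    (comps : List Int) (i : Nat) : List Int :=
  let p := start_end_times.getD i (0, 0)
  let prev := pvFindPrev individual comps (individual.getD i 0) i
  comps ++ [max prev p.1 + (p.2 - p.1)]

def calculate_completion_times_alt (individual : List Int) (start_end_times : List (Int × Int)) : List Int :=
  (List.range individual.length).foldl (pvStepB individual start_end_times) []

-- ===== PRECONDITION & SPEC =====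
-- Pre_ excludes exactly the inputs where Python A raises IndexError (a job index beyond start_end_times).
def Pre_calculate_completion_times (individual : List Int) (start_end_times : List (Int × Int)) : Prop :=
  individual.length ≤ start_end_times.length
instance (individual : List Int) (start_end_times : List (Int × Int)) : Decidable (Pre_calculate_completion_times individual start_end_times) := by unfold Pre_calculate_completion_times; infer_instance

def pvWitness_calculate_completion_times : List Int × (List (Int × Int)) := ([0, 1, 0], [(0, 2), (1, 3), (0, 5)])

def Spec_calculate_completion_times (individual : List Int) (start_end_times : List (Int × Int)) (out : List Int) : Prop := out = calculate_completion_times_alt individual start_end_times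
instance (individual : List Int) (start_end_times : List (Int × Int)) (out : List Int) : Decidable (Spec_calculate_completion_times individual start_end_times out) := by unfold Spec_calculate_completion_times; infer_instance

-- ===== CLAIM (what is proved, stated in full; the proofs are below) =====
def Claim_equal_calculate_completion_times : Prop := ∀ (individual : List Int) (start_end_times : List (Int × Int)), Dom_calculate_completion_times individual start_end_times → Pre_calculate_completion_times individual start_end_times → Spec_calculate_completion_times individual start_end_times (calculate_completion_times individual start_end_times)

-- ===== LEMMAS AND PROOFS =====

-- appending past the scanned prefix does not change the backward scan
lemma pvFindPrev_append (ind comps : List Int) (c s : Int) (j : Nat) (h : j ≤ comps.length) :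
    pvFindPrev ind (comps ++ [c]) s j = pvFindPrev ind comps s j := by
  induction j with
  | zero => rfl
  | succ j ih =>
    have hj : j < comps.length := h
    simp [pvFindPrev, List.getElem?_append_left hj, ih (Nat.le_of_lt hj)]

-- one unfolding step of the backward scan
lemma pvFindPrev_succ (ind comps : List Int) (s : Int) (j : Nat) :
    pvFindPrev ind comps s (j + 1)
      = if ind.getD j 0 == s then comps.getD j 0 else pvFindPrev ind comps s j := rfl

-- the invariant: after k steps, A's completions list equals B's, has length k, and
-- A's dictionary entry for every shift s is what B's backward scan over the first k jobs finds.
lemma pvInv (ind : List Int) (st : List (Int × Int)) (k : Nat) :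
    (((List.range k).foldl (pvStepA ind st (st.map (fun p => p.2 - p.1))) (PySem.Dict.empty, [])).2
       = (List.range k).foldl (pvStepB ind st) []) ∧
    ((List.range k).foldl (pvStepB ind st) []).length = k ∧
    (∀ s : Int,
      (((List.range k).foldl (pvStepA ind st (st.map (fun p => p.2 - p.1))) (PySem.Dict.empty, [])).1).getD s 0
        = pvFindPrev ind ((List.range k).foldl (pvStepB ind st) []) s k) := by
  induction k with
  | zero => exact ⟨rfl, rfl, fun s => rfl⟩
  | succ k ih =>
    obtain ⟨hc, hl, hd⟩ := ih
    set A := (List.range k).foldl (pvStepA ind st (st.map (fun p => p.2 - p.1))) (PySem.Dict.empty, []) with hA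
    set B := (List.range k).foldl (pvStepB ind st) [] with hB
    clear_value A B
    set ct := max (pvFindPrev ind B (ind.getD k 0) k) (st.getD k (0, 0)).1
              + ((st.getD k (0, 0)).2 - (st.getD k (0, 0)).1) with hct
    have hstepB : pvStepB ind st B k = B ++ [ct] := rfl
    -- the mapped processing time at k agrees with recomputing it from the pair (also off the end: 0 = 0)
    have hproc : (Option.map (fun p : Int × Int => p.2 - p.1) st[k]?).getD 0
        = (st[k]?.getD (0, 0)).2 - (st[k]?.getD (0, 0)).1 := by
      cases h : st[k]? <;> simp
    have hsame : pvStepA ind st (st.map (fun p => p.2 - p.1)) A k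
        = (A.1.insert (ind.getD k 0) ct, B ++ [ct]) := by
      simp [pvStepA, hd, hc, hproc, hct]
    have hget : (B ++ [ct]).getD k 0 = ct := by rw [← hl]; simp
    refine ⟨?_, ?_, ?_⟩
    · rw [List.range_succ, List.foldl_append, List.foldl_append]
      simp only [List.foldl_cons, List.foldl_nil]
      rw [← hA, ← hB, hsame, hstepB]
    · rw [List.range_succ, List.foldl_append]
      simp only [List.foldl_cons, List.foldl_nil]
      rw [← hB, hstepB]
      simp [hl]
    · intro s
      rw [List.range_succ, List.foldl_append, List.foldl_append]
      simp only [List.foldl_cons, List.foldl_nil]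
      rw [← hA, ← hB, hsame, hstepB]
      show (A.1.insert (ind.getD k 0) ct).getD s 0 = pvFindPrev ind (B ++ [ct]) s (k + 1)
      rw [PySem.Dict.getD_insert, pvFindPrev_succ, hget,
          pvFindPrev_append _ _ _ _ _ (Nat.le_of_eq hl.symm), hd s]
      by_cases hs : s = ind.getD k 0
      · simp [hs]
      · rw [if_neg hs, if_neg (by simpa using Ne.symm hs)]

-- ===== VERDICT (by name: the statement is the Claim_ definition above) =====
theorem calculate_completion_times_spec : Claim_equal_calculate_completion_times := by
  intro ind st _ _
  show _ = _
  unfold calculate_completion_times calculate_completion_times_alt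
  exact (pvInv ind st ind.length).1
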